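-- pv_equiv track=rewrite | github.com/mmichalak-swe/Algo_Expert_Python | Same_BSTs/attempt_2.py | sameBSTHelper
-- ===== SOURCE A (Python) =====
-- def sameBSTHelper(arrayOne, arrayTwo):
--     if arrayOne == arrayTwo == []:
--         return True
--
--     arrayOneRoot = arrayOne[0] if arrayOne else None
--     arrayTwoRoot = arrayTwo[0] if arrayTwo else None
--     if len(arrayOne) != len(arrayTwo) or arrayOneRoot != arrayTwoRoot:
--         return False
--
--     arrayOneLeft = [num for num in arrayOne if num < arrayOne[0]]
--     arrayTwoLeft = [num for num in arrayTwo if num < arrayTwo[0]]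
--     arrayOneRight = [arrayOne[i] for i in range(1, len(arrayOne)) if arrayOne[i] >= arrayOne[0]]
--     arrayTwoRight = [arrayTwo[i] for i in range(1, len(arrayTwo)) if arrayTwo[i] >= arrayTwo[0]]
--
--     return sameBSTHelper(arrayOneLeft, arrayTwoLeft) and sameBSTHelper(arrayOneRight, arrayTwoRight)
-- ===== SOURCE B (Python) =====
-- def sameBSTHelper(arrayOne, arrayTwo):
--     # Build each BST once by iterative insertion (duplicates go right), then
--     # compare the two trees structurally.  Nodes are [value, left, right].
--     def build(nums):
--         root = None
--         for x in nums:
--             if root is None: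
--                 root = [x, None, None]
--                 continue
--             cur = root
--             while True:
--                 if x < cur[0]:
--                     if cur[1] is None:
--                         cur[1] = [x, None, None]
--                         break
--                     cur = cur[1]
--                 else:
--                     if cur[2] is None:
--                         cur[2] = [x, None, None]
--                         break
--                     cur = cur[2]
--         return root
--     return build(arrayOne) == build(arrayTwo)
-- ===== Notes on version B (the rewrite author's own statement) =====
-- stated objective: alternative
-- what changed: B builds each BST once by iterative insertion and compares the two trees structurally, instead of A's recursion that re-partitions and copies left/right sublists at every level.
import Mathlib
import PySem

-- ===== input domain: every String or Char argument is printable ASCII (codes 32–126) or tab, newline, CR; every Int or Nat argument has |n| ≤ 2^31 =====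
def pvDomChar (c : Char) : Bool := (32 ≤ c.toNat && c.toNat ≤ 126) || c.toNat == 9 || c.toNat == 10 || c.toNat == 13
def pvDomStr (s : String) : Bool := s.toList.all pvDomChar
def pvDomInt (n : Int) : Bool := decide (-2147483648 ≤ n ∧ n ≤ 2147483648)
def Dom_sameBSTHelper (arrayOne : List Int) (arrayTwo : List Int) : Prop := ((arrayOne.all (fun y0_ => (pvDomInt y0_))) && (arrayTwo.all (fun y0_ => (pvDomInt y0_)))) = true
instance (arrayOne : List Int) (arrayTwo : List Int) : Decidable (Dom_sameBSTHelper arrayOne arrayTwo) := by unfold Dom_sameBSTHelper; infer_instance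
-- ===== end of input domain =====

-- B builds each BST once by insertion and compares the two trees structurally, instead of A's
-- recursive re-partitioning that copies sublists at every level (objective: alternative algorithm).

-- ===== PORT A =====
-- termination helpers cited by the port's decreasing_by
theorem pv_left_dec (a : List Int) (h : a ≠ []) :
    (a.filter (fun num => decide (num < a.headD 0))).length < a.length := by
  obtain ⟨x, xs, rfl⟩ := List.exists_cons_of_ne_nil h
  simp only [List.headD_cons, List.filter_cons, decide_eq_true_eq, lt_irrefl, if_false,
    List.length_cons]
  exact Nat.lt_succ_of_le (List.length_filter_le _ _)

theorem pv_left_dec_attach (a : List Int) (h : a ≠ []) :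
    (List.filter (fun (x : {x // x ∈ a}) => decide ((x : Int) < a.headD 0)) a.attach).length
      < a.length := by
  have e : (List.filter (fun (x : {x // x ∈ a}) => decide ((x : Int) < a.headD 0)) a.attach).length
      = (a.filter (fun num => decide (num < a.headD 0))).length := by
    rw [← List.countP_eq_length_filter, ← List.countP_eq_length_filter]
    exact List.countP_attach (p := fun num => decide (num < a.headD 0))
  rw [e]
  exact pv_left_dec a h

theorem pv_right_dec (a : List Int) (h : a ≠ []) :
    ((a.drop 1).filter (fun num => decide (a.headD 0 ≤ num))).length < a.length := by
  obtain ⟨x, xs, rfl⟩ := List.exists_cons_of_ne_nil h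
  simpa using Nat.lt_succ_of_le (List.length_filter_le _ xs)

-- literal port of A; in the final branch both lists are nonempty (equal lengths,
-- not both empty), so `headD 0` is exactly Python's `array[0]`
def sameBSTHelper (arrayOne : List Int) (arrayTwo : List Int) : Bool :=
  if arrayOne = [] ∧ arrayTwo = [] then true
  else if arrayOne.length ≠ arrayTwo.length ∨ arrayOne.head? ≠ arrayTwo.head? then false
  else
    sameBSTHelper (arrayOne.filter (fun num => decide (num < arrayOne.headD 0)))
        (arrayTwo.filter (fun num => decide (num < arrayTwo.headD 0))) &&
      sameBSTHelper ((arrayOne.drop 1).filter (fun num => decide (arrayOne.headD 0 ≤ num)))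
        ((arrayTwo.drop 1).filter (fun num => decide (arrayTwo.headD 0 ≤ num)))
termination_by arrayOne.length
decreasing_by
  all_goals {
    rename_i hb hg
    have ha : arrayOne ≠ [] := by
      rintro rfl
      rcases not_or.mp hg with ⟨hl, -⟩
      simp only [List.length_nil] at hl
      have h0 : arrayTwo.length = 0 := by omega
      exact hb ⟨rfl, List.eq_nil_of_length_eq_zero h0⟩
    try simp only [List.length_unattach]
    first
      | exact pv_left_dec_attach arrayOne ha
      | exact pv_right_dec arrayOne ha }

-- ===== PORT B =====
inductive BTree : Type
  | leaf : BTree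
  | node : Int → BTree → BTree → BTree
deriving DecidableEq, Repr

def insertT : BTree → Int → BTree
  | .leaf, x => .node x .leaf .leaf
  | .node v l r, x => if x < v then .node v (insertT l x) r else .node v l (insertT r x)

def buildT (nums : List Int) : BTree := nums.foldl insertT .leaf

def sameBSTHelper_alt (arrayOne : List Int) (arrayTwo : List Int) : Bool :=
  decide (buildT arrayOne = buildT arrayTwo)

-- ===== PRECONDITION & SPEC =====
def Spec_sameBSTHelper (arrayOne : List Int) (arrayTwo : List Int) (out : Bool) : Prop := out = sameBSTHelper_alt arrayOne arrayTwo
instance (arrayOne : List Int) (arrayTwo : List Int) (out : Bool) : Decidable (Spec_sameBSTHelper arrayOne arrayTwo out) := by unfold Spec_sameBSTHelper; infer_instance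

-- ===== CLAIM (what is proved, stated in full; the proofs are below) =====
def Claim_equal_sameBSTHelper : Prop := ∀ (arrayOne : List Int) (arrayTwo : List Int), Dom_sameBSTHelper arrayOne arrayTwo → Spec_sameBSTHelper arrayOne arrayTwo (sameBSTHelper arrayOne arrayTwo)

-- ===== LEMMAS AND PROOFS =====
def tsize : BTree → Nat
  | .leaf => 0
  | .node _ l r => tsize l + tsize r + 1

theorem tsize_insertT (t : BTree) (x : Int) : tsize (insertT t x) = tsize t + 1 := by
  induction t with
  | leaf => rfl
  | node v l r ihl ihr =>
      simp only [insertT]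
      split <;> simp [tsize, ihl, ihr] <;> omega

theorem tsize_foldl (xs : List Int) (t : BTree) :
    tsize (xs.foldl insertT t) = tsize t + xs.length := by
  induction xs generalizing t with
  | nil => simp
  | cons x xs ih => simp [List.foldl_cons, ih, tsize_insertT]; omega

theorem tsize_buildT (xs : List Int) : tsize (buildT xs) = xs.length := by
  simp [buildT, tsize_foldl, tsize]

theorem foldl_insertT_node (xs : List Int) (v : Int) (l r : BTree) :
    xs.foldl insertT (.node v l r) =
      .node v ((xs.filter (fun x => decide (x < v))).foldl insertT l)
             ((xs.filter (fun x => !decide (x < v))).foldl insertT r) := by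
  induction xs generalizing l r with
  | nil => simp
  | cons x xs ih =>
      by_cases hx : x < v <;>
        simp [List.foldl_cons, insertT, hx, ih]

theorem buildT_cons (x : Int) (xs : List Int) :
    buildT (x :: xs) =
      .node x (buildT (xs.filter (fun n => decide (n < x))))
             (buildT (xs.filter (fun n => decide (x ≤ n)))) := by
  have hp : xs.filter (fun n => !decide (n < x)) = xs.filter (fun n => decide (x ≤ n)) := by
    apply List.filter_congr
    intro n _
    simp [← decide_not, not_lt]
  simp only [buildT, List.foldl_cons, insertT]
  rw [foldl_insertT_node, hp]

theorem buildT_length_eq {a b : List Int} (h : buildT a = buildT b) : a.length = b.length := by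
  rw [← tsize_buildT a, ← tsize_buildT b, h]

theorem sameBSTHelper_eq_buildT :
    ∀ (n : Nat) (a b : List Int), a.length ≤ n →
      sameBSTHelper a b = decide (buildT a = buildT b) := by
  intro n
  induction n with
  | zero =>
      intro a b ha
      have hn : a = [] := List.eq_nil_of_length_eq_zero (by omega)
      subst hn
      rw [sameBSTHelper]
      cases b with
      | nil => simp
      | cons y ys =>
          have hne : buildT ([] : List Int) ≠ buildT (y :: ys) := by
            intro heq
            have hl := buildT_length_eq heq
            simp at hl
          simp [hne]
  | succ n ih =>
      intro a b ha
      rw [sameBSTHelper]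
      split_ifs with h1 h2
      · obtain ⟨rfl, rfl⟩ := h1
        simp
      · symm; rw [decide_eq_false_iff_not]
        intro heq
        have hlen' := buildT_length_eq heq
        rcases h2 with hlen | hhead
        · exact hlen hlen'
        · cases a with
          | nil =>
              cases b with
              | nil => exact hhead rfl
              | cons y ys => simp at hlen'
          | cons x xs =>
              cases b with
              | nil => simp at hlen'
              | cons y ys =>
                  rw [buildT_cons, buildT_cons] at heq
                  injection heq with h _ _
                  exact hhead (by simp [h])
      · -- same nonempty head on both sides
        rcases not_or.mp h2 with ⟨hlen, hhead⟩
        cases a with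
        | nil =>
            exact absurd ⟨rfl, List.eq_nil_of_length_eq_zero (by simp_all)⟩ h1
        | cons x xs =>
            cases b with
            | nil => simp at hhead
            | cons y ys =>
                have hxy : x = y := by simpa using not_ne_iff.mp hhead
                subst hxy
                have hxs : xs.length ≤ n := by
                  simp only [List.length_cons] at ha; omega
                simp only [List.headD_cons, List.drop_one, List.tail_cons, List.filter_cons,
                  decide_eq_true_eq, lt_irrefl, if_false]
                rw [ih _ _ (le_trans (List.length_filter_le _ xs) hxs),
                    ih _ _ (le_trans (List.length_filter_le _ xs) hxs),
                    buildT_cons, buildT_cons]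
                simp [BTree.node.injEq, Bool.decide_and]
                rfl

-- ===== VERDICT (by name: the statement is the Claim_ definition above) =====
theorem sameBSTHelper_spec : Claim_equal_sameBSTHelper := by
  intro a b _
  unfold Spec_sameBSTHelper sameBSTHelper_alt
  exact sameBSTHelper_eq_buildT a.length a b le_rfl
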